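-- pv_equiv track=rewrite | github.com/mharmanani/bioinformatics-algorithms | consensus-profile/src/consensus.py | compute_consensus_string
-- ===== SOURCE A (Python) =====
-- def compute_consensus_string(profile, n):
-- 	consensus = ''
-- 	for i in range(n):
-- 		column = []
-- 		for base in profile:
-- 			column += [(profile[base][i], base)]
-- 		consensus += max(column)[1]
-- 	return consensus
-- ===== SOURCE B (Python) =====
-- def compute_consensus_string(profile, n):
-- 	# Transposed single-sweep: keep a per-position running best (count, base) pair,
-- 	# updated strictly-greater-only while scanning each base's count row once.
-- 	best = [None] * n
-- 	for base in profile: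
-- 		counts = profile[base]
-- 		for i in range(n):
-- 			cand = (counts[i], base)
-- 			if best[i] is None or cand > best[i]:
-- 				best[i] = cand
-- 	return ''.join(b[1] for b in best)
-- ===== Notes on version B (the rewrite author's own statement) =====
-- stated objective: alternative
-- what changed: A rebuilds a column list and calls max() for every position (positions outer, bases inner); B transposes the loops into one sweep per base that updates a per-position running best (count, base) pair with a strict lexicographic '>' and joins the winners at the end.
import Mathlib
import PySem

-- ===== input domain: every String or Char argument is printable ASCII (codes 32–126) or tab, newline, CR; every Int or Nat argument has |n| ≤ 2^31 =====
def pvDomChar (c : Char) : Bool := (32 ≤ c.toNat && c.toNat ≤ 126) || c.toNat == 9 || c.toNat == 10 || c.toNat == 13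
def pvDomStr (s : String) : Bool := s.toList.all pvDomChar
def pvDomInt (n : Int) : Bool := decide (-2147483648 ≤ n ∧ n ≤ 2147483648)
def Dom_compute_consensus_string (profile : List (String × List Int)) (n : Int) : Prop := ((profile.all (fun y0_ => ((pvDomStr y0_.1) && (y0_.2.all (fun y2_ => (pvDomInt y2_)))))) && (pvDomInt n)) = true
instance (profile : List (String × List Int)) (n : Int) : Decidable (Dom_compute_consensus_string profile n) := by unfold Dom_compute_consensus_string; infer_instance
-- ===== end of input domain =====

-- B transposes A's two nested loops: one sweep per base updating a per-position running best
-- (count, base) pair, instead of rebuilding and maxing a column list for every position (objective: alternative decomposition).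


-- ===== PORT A =====
-- The Python parameter is a dict[str, list[int]]; under the type convention it arrives as an
-- association list, so both ports first build the PySem.Dict it denotes (last value wins, first
-- key position kept), exactly as Python's dict construction does.
def compute_consensus_string (profile : List (String × List Int)) (n : Int) : String :=
  let d := PySem.Dict.ofList profile
  String.mk ((PySem.List.pyRange 0 n 1).foldl (fun consensus i =>
    let column := d.items.foldl (fun col p => col ++ [(PySem.List.pyGetD p.2 i 0, p.1)]) []
    -- profile[base][i] is in range under Pre_; max([]) raises ValueError in Python — Pre_ excludes that
    match PySem.List.max2? column (fun t => t.1) (fun t => t.2) with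
    | some m => consensus ++ m.2.toList
    | none => consensus) [])

-- ===== PORT B =====
-- Python's '>' on (int, str) tuples: lexicographic strict greater
def pyPairGT (c b : Int × String) : Bool :=
  decide (b.1 < c.1) || (!decide (c.1 < b.1) && decide (b.2 < c.2))

def compute_consensus_string_alt (profile : List (String × List Int)) (n : Int) : String :=
  let d := PySem.Dict.ofList profile
  let best0 : List (Option (Int × String)) := List.replicate n.toNat none
  let best := d.items.foldl (fun best p =>
    (PySem.List.pyRange 0 n 1).foldl (fun best i =>
      match PySem.List.pyGetD best i none with
      | none => best.set i.toNat (some (PySem.List.pyGetD p.2 i 0, p.1))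
      | some b => if pyPairGT (PySem.List.pyGetD p.2 i 0, p.1) b then best.set i.toNat (some (PySem.List.pyGetD p.2 i 0, p.1)) else best) best) best0
  -- ''.join(b[1] for b in best); a None entry makes Python raise — Pre_ excludes that
  String.mk (best.foldl (fun acc ob =>
    match ob with
    | some b => acc ++ b.2.toList
    | none => acc) [])

-- ===== PRECONDITION & SPEC =====
-- Pre_ = exactly the inputs where the Python A returns: n ≤ 0 (empty range), or a nonempty profile
-- all of whose (surviving, dict-semantics) count rows have at least n entries; otherwise A raises
-- ValueError (max of an empty column) or IndexError (row shorter than n).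
def Pre_compute_consensus_string (profile : List (String × List Int)) (n : Int) : Prop :=
  n ≤ 0 ∨ (profile ≠ [] ∧ ∀ p ∈ (PySem.Dict.ofList profile).items, n ≤ (p.2.length : Int))
instance (profile : List (String × List Int)) (n : Int) : Decidable (Pre_compute_consensus_string profile n) := by unfold Pre_compute_consensus_string; infer_instance
def pvWitness_compute_consensus_string : (List (String × List Int)) × Int :=
  ([("A", [1, 2]), ("C", [0, 5])], 2)

def Spec_compute_consensus_string (profile : List (String × List Int)) (n : Int) (out : String) : Prop := out = compute_consensus_string_alt profile n
instance (profile : List (String × List Int)) (n : Int) (out : String) : Decidable (Spec_compute_consensus_string profile n out) := by unfold Spec_compute_consensus_string; infer_instance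

-- ===== CLAIM (what is proved, stated in full; the proofs are below) =====
def Claim_equal_compute_consensus_string : Prop := ∀ (profile : List (String × List Int)) (n : Int), Dom_compute_consensus_string profile n → Pre_compute_consensus_string profile n → Spec_compute_consensus_string profile n (compute_consensus_string profile n)

-- ===== LEMMAS AND PROOFS =====

-- one strict-greater update step of the running best (B's branch; also max2?'s fold step)
def pvStep (o : Option (Int × String)) (c : Int × String) : Option (Int × String) :=
  match o with
  | none => some c
  | some b => if pyPairGT c b then some c else some b

-- the candidate pair a row p contributes at position i
def pvCand (p : String × List Int) (i : Int) : Int × String := (PySem.List.pyGetD p.2 i 0, p.1)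

-- running best over all rows at position i
def pvBest (L : List (String × List Int)) (i : Int) : Option (Int × String) :=
  L.foldl (fun o p => pvStep o (pvCand p i)) none

def pvExtract (o : Option (Int × String)) : List Char :=
  match o with
  | some m => m.2.toList
  | none => []

lemma pv_max2_eq_best (L : List (String × List Int)) (i : Int) :
    PySem.List.max2? (L.map (fun p => pvCand p i)) (fun t => t.1) (fun t => t.2) = pvBest L i := by
  unfold PySem.List.max2? pvBest
  rw [List.foldl_map]
  congr 1
  funext o p
  cases o with
  | none => rfl
  | some b => simp [pvStep, pyPairGT]

lemma pv_range_eq (n : Int) :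
    PySem.List.pyRange 0 n 1 = (List.range n.toNat).map (fun (k : Nat) => (k : Int)) := by
  by_cases h : 0 ≤ n
  · obtain ⟨m, rfl⟩ := Int.eq_ofNat_of_zero_le h
    simpa using PySem.List.pyRange_zero_natCast m
  · have h1 : n.toNat = 0 := by omega
    rw [h1]
    simp only [List.range_zero, List.map_nil, PySem.List.pyRange]
    simp
    omega

lemma pv_range_toNat (n : Int) :
    PySem.List.pyRange 0 n 1 = PySem.List.pyRange 0 ((n.toNat : Nat) : Int) 1 := by
  rw [pv_range_eq, pv_range_eq, Int.toNat_natCast]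

-- one row's inner loop updates every position of the running-best list by one pvStep
lemma pv_inner (p : String × List Int) :
    ∀ (m : Nat) (g : Nat → Option (Int × String)) (suffix : List (Option (Int × String))),
    (PySem.List.pyRange 0 (m : Int) 1).foldl (fun best i =>
        match PySem.List.pyGetD best i none with
        | none => best.set i.toNat (some (PySem.List.pyGetD p.2 i 0, p.1))
        | some b => if pyPairGT (PySem.List.pyGetD p.2 i 0, p.1) b then best.set i.toNat (some (PySem.List.pyGetD p.2 i 0, p.1)) else best)
      ((List.range m).map g ++ suffix)
    = (List.range m).map (fun j => pvStep (g j) (pvCand p (j : Int))) ++ suffix := by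
  intro m
  induction m with
  | zero => intro g suffix; simp [PySem.List.pyRange]
  | succ m ih =>
    intro g suffix
    have hr : PySem.List.pyRange 0 ((m + 1 : Nat) : Int) 1 = PySem.List.pyRange 0 (m : Int) 1 ++ [(m : Int)] := by
      push_cast
      exact PySem.List.pyRange_one_succ_right (by positivity)
    rw [hr, List.foldl_append, List.range_succ, List.map_append, List.map_singleton,
        List.append_assoc, List.singleton_append, ih g (g m :: suffix)]
    have hlen : ((List.range m).map (fun j => pvStep (g j) (pvCand p (j : Int)))).length = m := by simp
    have hget : PySem.List.pyGetD
        ((List.range m).map (fun j => pvStep (g j) (pvCand p (j : Int))) ++ g m :: suffix) (m : Int) none = g m := by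
      rw [PySem.List.pyGetD_natCast]
      simp [List.getD_eq_getElem?_getD, List.getElem?_append_right, hlen]
    have hset : ∀ v, ((List.range m).map (fun j => pvStep (g j) (pvCand p (j : Int))) ++ g m :: suffix).set m v
        = (List.range m).map (fun j => pvStep (g j) (pvCand p (j : Int))) ++ v :: suffix := by
      intro v
      rw [List.set_append]
      simp [hlen]
    simp only [List.foldl_cons, List.foldl_nil, hget, Int.toNat_natCast,
      List.map_append, List.map_singleton, List.append_assoc, List.singleton_append]
    cases hgm : g m with
    | none => rw [hgm] at hset; rw [hset]; simp [pvStep, pvCand]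
    | some b =>
      rw [hgm] at hset
      by_cases hgt : pyPairGT (PySem.List.pyGetD p.2 (m : Int) 0, p.1) b
      all_goals simp only [hgt, if_true, if_false]
      · rw [hset]; simp only [pvStep, pvCand]
        simp [PySem.List.pyGetD] at hgt
        simp [hgt]
      · simp only [pvStep, pvCand]
        simp [PySem.List.pyGetD] at hgt
        simp [hgt]

-- the whole outer loop: every position ends at its own running best
lemma pv_outer (m : Nat) :
    ∀ (L : List (String × List Int)) (g : Nat → Option (Int × String)),
    L.foldl (fun best p =>
      (PySem.List.pyRange 0 (m : Int) 1).foldl (fun best i =>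
        match PySem.List.pyGetD best i none with
        | none => best.set i.toNat (some (PySem.List.pyGetD p.2 i 0, p.1))
        | some b => if pyPairGT (PySem.List.pyGetD p.2 i 0, p.1) b then best.set i.toNat (some (PySem.List.pyGetD p.2 i 0, p.1)) else best) best)
      ((List.range m).map g)
    = (List.range m).map (fun (j : Nat) => L.foldl (fun o p => pvStep o (pvCand p (j : Int))) (g j)) := by
  intro L
  induction L with
  | nil => intro g; rfl
  | cons p t ih =>
    intro g
    have h1 := pv_inner p m g []
    simp only [List.append_nil] at h1
    simp only [List.foldl_cons, h1, ih]

lemma pv_a_chars (L : List (String × List Int)) (n : Int) :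
    (PySem.List.pyRange 0 n 1).foldl (fun consensus i =>
      match PySem.List.max2? (L.foldl (fun col p => col ++ [(PySem.List.pyGetD p.2 i 0, p.1)]) [])
          (fun t => t.1) (fun t => t.2) with
      | some m => consensus ++ m.2.toList
      | none => consensus) []
    = (List.range n.toNat).flatMap (fun (j : Nat) => pvExtract (pvBest L (j : Int))) := by
  have hcol : ∀ i : Int, L.foldl (fun col p => col ++ [(PySem.List.pyGetD p.2 i 0, p.1)]) []
      = L.map (fun p => pvCand p i) := by
    intro i
    simpa using PySem.List.foldl_append_singleton_eq_map (fun p => pvCand p i) L []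
  have hbody : (fun (consensus : List Char) (i : Int) =>
      match PySem.List.max2? (L.foldl (fun col p => col ++ [(PySem.List.pyGetD p.2 i 0, p.1)]) [])
          (fun t => t.1) (fun t => t.2) with
      | some m => consensus ++ m.2.toList
      | none => consensus)
      = fun consensus i => consensus ++ pvExtract (pvBest L i) := by
    funext consensus i
    rw [hcol i, pv_max2_eq_best]
    cases pvBest L i with
    | none => simp [pvExtract]
    | some m => simp [pvExtract]
  rw [hbody, PySem.List.foldl_append_eq_flatMap, pv_range_eq, List.flatMap_map]
  simp

lemma pv_b_chars (L : List (String × List Int)) (n : Int) :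
    (L.foldl (fun best p =>
        (PySem.List.pyRange 0 n 1).foldl (fun best i =>
          match PySem.List.pyGetD best i none with
          | none => best.set i.toNat (some (PySem.List.pyGetD p.2 i 0, p.1))
          | some b => if pyPairGT (PySem.List.pyGetD p.2 i 0, p.1) b then best.set i.toNat (some (PySem.List.pyGetD p.2 i 0, p.1)) else best) best)
      (List.replicate n.toNat none)).foldl (fun acc ob =>
        match ob with
        | some b => acc ++ b.2.toList
        | none => acc) []
    = (List.range n.toNat).flatMap (fun (j : Nat) => pvExtract (pvBest L (j : Int))) := by
  have h0 : (List.replicate n.toNat (none : Option (Int × String)))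
      = (List.range n.toNat).map (fun _ => none) := by
    simp [List.map_const']
  have hbody : (fun (acc : List Char) (ob : Option (Int × String)) =>
      match ob with
      | some b => acc ++ b.2.toList
      | none => acc) = fun acc ob => acc ++ pvExtract ob := by
    funext acc ob
    cases ob with
    | none => simp [pvExtract]
    | some b => simp [pvExtract]
  rw [h0, pv_range_toNat, pv_outer n.toNat L (fun _ => none), hbody,
      PySem.List.foldl_append_eq_flatMap, List.flatMap_map]
  simp [pvBest]

-- ===== VERDICT (by name: the statement is the Claim_ definition above) =====
theorem compute_consensus_string_spec : Claim_equal_compute_consensus_string := by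
  intro profile n _ _
  unfold Spec_compute_consensus_string compute_consensus_string compute_consensus_string_alt
  dsimp only []
  rw [pv_a_chars, pv_b_chars]
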